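-- pv_equiv track=rewrite | github.com/janskwr/PPPD | zadania_punktowe/ZADANIE_4.py | czy_wygrana
-- ===== SOURCE A (Python) =====
-- def czy_remis(plansza):
--     liczba_wierszy = len(plansza)
--     liczba_kolumn = len(plansza[0])
--     for wiersz in range(liczba_wierszy):
--         for kolumna in range(liczba_kolumn):
--             if plansza[wiersz][kolumna] == 0:
--                 return False
--     return True
--
-- def czy_wygrana(plansza, ile_pod_rzad):
--     liczba_wierszy = len(plansza)
--     liczba_kolumn = len(plansza[0])
--     for wiersz in range(liczba_wierszy):
--         counter1 = 0
--         counter2 = 0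
--         for kolumna in range(liczba_kolumn):
--             if plansza[wiersz][kolumna] == 1:
--                 counter2 = 0
--                 counter1 += 1
--                 if counter1 == ile_pod_rzad:
--                     return 1
--             elif plansza[wiersz][kolumna] == 2:
--                 counter1 = 0
--                 counter2 += 1
--                 if counter2 == ile_pod_rzad:
--                     return 2
--             else:
--                 counter1 = 0
--                 counter2 = 0
--     for kolumna in range(liczba_kolumn):
--         counter1 = 0
--         counter2 = 0
--         for wiersz in range(liczba_wierszy):
--             if plansza[wiersz][kolumna] == 1:
--                 counter2 = 0
--                 counter1 += 1
--                 if counter1 == ile_pod_rzad: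
--                     return 1
--             elif plansza[wiersz][kolumna] == 2:
--                 counter1 = 0
--                 counter2 += 1
--                 if counter2 == ile_pod_rzad:
--                     return 2
--             else:
--                 counter1 = 0
--                 counter2 = 0
--     if czy_remis(plansza):
--         return 3
--     return 0
-- ===== SOURCE B (Python) =====
-- def _scan_line_windows(line, k):
--     # sliding window: first start position whose k cells are all one player's
--     if k < 1:
--         return None
--     while len(line) >= k:
--         if all(v == 1 for v in line[:k]):
--             return 1
--         if all(v == 2 for v in line[:k]):
--             return 2
--         line = line[1:]
--     return None
--
-- def czy_wygrana(plansza, ile_pod_rzad):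
--     k = ile_pod_rzad
--     nc = len(plansza[0])
--     rows = [row[:nc] for row in plansza]
--     cols = [[row[c] for row in rows] for c in range(nc)]
--     for line in rows + cols:
--         w = _scan_line_windows(line, k)
--         if w is not None:
--             return w
--     if all(v != 0 for row in rows for v in row):
--         return 3
--     return 0
-- ===== Notes on version B (the rewrite author's own statement) =====
-- stated objective: alternative
-- what changed: Replaces A's running-counter scan with counter resets by an explicit sliding-window search: rows and columns are first materialised as value lists and each line is scanned window-by-window for k equal cells, the draw test becoming a single all() over the cells.
-- outside the precondition, e.g. on czy_wygrana([[1, 1], [0]], 2): A returns 1, B raises IndexError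
import Mathlib
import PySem

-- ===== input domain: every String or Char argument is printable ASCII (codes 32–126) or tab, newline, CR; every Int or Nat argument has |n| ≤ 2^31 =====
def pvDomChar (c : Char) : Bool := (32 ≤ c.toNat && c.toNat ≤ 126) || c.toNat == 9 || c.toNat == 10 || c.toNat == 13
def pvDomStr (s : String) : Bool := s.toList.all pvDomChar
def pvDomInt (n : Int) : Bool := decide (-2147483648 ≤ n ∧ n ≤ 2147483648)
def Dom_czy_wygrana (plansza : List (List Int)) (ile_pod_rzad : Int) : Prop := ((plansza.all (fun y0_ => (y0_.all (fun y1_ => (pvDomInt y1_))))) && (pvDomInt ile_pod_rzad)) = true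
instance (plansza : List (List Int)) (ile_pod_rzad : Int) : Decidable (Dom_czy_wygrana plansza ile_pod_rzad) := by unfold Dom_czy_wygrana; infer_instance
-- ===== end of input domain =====

-- B replaces A's running-counter scan by an explicit sliding-window search over
-- materialised row/column value lists (alternative decomposition, same cost class).

-- ===== PORT A =====
-- plansza[i][j]; the default 0 is never reached under Pre_ (indices stay in range).
def cellA (plansza : List (List Int)) (i j : Int) : Int :=
  ((PySem.List.pyGet? plansza i).bind (fun r => PySem.List.pyGet? r j)).getD 0

-- inner 'for kolumna/wiersz in range(…)' loop of A with its two counters and early return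
def lineScanA (cell : Int → Int) (k : Int) : List Int → Int → Int → Option Int
  | [], _, _ => none
  | j :: js, c1, c2 =>
      if cell j = 1 then
        (if c1 + 1 = k then some 1 else lineScanA cell k js (c1 + 1) 0)
      else if cell j = 2 then
        (if c2 + 1 = k then some 2 else lineScanA cell k js 0 (c2 + 1))
      else lineScanA cell k js 0 0

-- outer 'for wiersz in range(liczba_wierszy)' loop (first early return wins)
def rowsLoopA (plansza : List (List Int)) (nc k : Int) : List Int → Option Int
  | [] => none
  | w :: ws =>
      match lineScanA (fun j => cellA plansza w j) k (PySem.List.pyRange 0 nc 1) 0 0 with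
      | some r => some r
      | none => rowsLoopA plansza nc k ws

-- outer 'for kolumna in range(liczba_kolumn)' loop
def colsLoopA (plansza : List (List Int)) (nr k : Int) : List Int → Option Int
  | [] => none
  | c :: cs =>
      match lineScanA (fun i => cellA plansza i c) k (PySem.List.pyRange 0 nr 1) 0 0 with
      | some r => some r
      | none => colsLoopA plansza nr k cs

-- czy_remis: inner column loop with early return False
def remisLineA (cell : Int → Int) : List Int → Bool
  | [] => true
  | j :: js => if cell j = 0 then false else remisLineA cell js

def remisRowsA (plansza : List (List Int)) (nc : Int) : List Int → Bool
  | [] => true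
  | w :: ws =>
      if remisLineA (fun j => cellA plansza w j) (PySem.List.pyRange 0 nc 1) then
        remisRowsA plansza nc ws
      else false

def czy_remis (plansza : List (List Int)) : Bool :=
  remisRowsA plansza (PySem.List.len (plansza.headD []))
    (PySem.List.pyRange 0 (PySem.List.len plansza) 1)

def czy_wygrana (plansza : List (List Int)) (ile_pod_rzad : Int) : Int :=
  let nr := PySem.List.len plansza
  let nc := PySem.List.len (plansza.headD [])   -- len(plansza[0]); Pre_ gives plansza ≠ []
  match rowsLoopA plansza nc ile_pod_rzad (PySem.List.pyRange 0 nr 1) with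
  | some r => r
  | none =>
    match colsLoopA plansza nr ile_pod_rzad (PySem.List.pyRange 0 nc 1) with
    | some r => r
    | none => if czy_remis plansza then 3 else 0

-- ===== PORT B =====
-- _scan_line_windows: while len(line) >= k: test line[:k] against each player, drop head
def winScanGo (k : Int) : List Int → Option Int
  | [] => none
  | v :: rest =>
      if PySem.List.len (v :: rest) < k then none
      else if (PySem.List.slice (v :: rest) none (some k)).all (fun x => x == 1) then some 1
      else if (PySem.List.slice (v :: rest) none (some k)).all (fun x => x == 2) then some 2
      else winScanGo k rest

def winScan (line : List Int) (k : Int) : Option Int :=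
  if k < 1 then none else winScanGo k line

-- 'for line in rows + cols' with early return
def linesLoopB (k : Int) : List (List Int) → Option Int
  | [] => none
  | l :: ls =>
      match winScan l k with
      | some r => some r
      | none => linesLoopB k ls

def czy_wygrana_alt (plansza : List (List Int)) (ile_pod_rzad : Int) : Int :=
  let nc := PySem.List.len (plansza.headD [])   -- len(plansza[0]); Pre_ gives plansza ≠ []
  let rows := plansza.map (fun row => PySem.List.slice row none (some nc))
  let cols := (PySem.List.pyRange 0 nc 1).map
    (fun c => rows.map (fun row => PySem.List.pyGetD row c 0))
  match linesLoopB ile_pod_rzad (rows ++ cols) with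
  | some r => r
  | none =>
    if rows.all (fun row => row.all (fun v => !(v == 0))) then 3 else 0

-- ===== PRECONDITION & SPEC =====
-- Pre_ excludes the empty board (A raises IndexError on plansza[0]) and ragged boards with a
-- row shorter than the first row: there A raises IndexError once a scan reaches the missing
-- cell (a win found in an earlier row may still return first), and B raises when building cols.
def Pre_czy_wygrana (plansza : List (List Int)) (ile_pod_rzad : Int) : Prop :=
  plansza ≠ [] ∧ ∀ row ∈ plansza, (plansza.headD []).length ≤ row.length
instance (plansza : List (List Int)) (ile_pod_rzad : Int) : Decidable (Pre_czy_wygrana plansza ile_pod_rzad) := by unfold Pre_czy_wygrana; infer_instance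

def pvWitness_czy_wygrana : List (List Int) × Int := ([[1, 0], [0, 2]], 2)

def Spec_czy_wygrana (plansza : List (List Int)) (ile_pod_rzad : Int) (out : Int) : Prop := out = czy_wygrana_alt plansza ile_pod_rzad
instance (plansza : List (List Int)) (ile_pod_rzad : Int) (out : Int) : Decidable (Spec_czy_wygrana plansza ile_pod_rzad out) := by unfold Spec_czy_wygrana; infer_instance

-- ===== CLAIM (what is proved, stated in full; the proofs are below) =====
def Claim_equal_czy_wygrana : Prop := ∀ (plansza : List (List Int)) (ile_pod_rzad : Int), Dom_czy_wygrana plansza ile_pod_rzad → Pre_czy_wygrana plansza ile_pod_rzad → Spec_czy_wygrana plansza ile_pod_rzad (czy_wygrana plansza ile_pod_rzad)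


-- ===== LEMMAS AND PROOFS =====

-- value-list form of A's inner scan (proof helper)
def scanV (k : Int) : List Int → Int → Int → Option Int
  | [], _, _ => none
  | v :: vs, c1, c2 =>
      if v = 1 then (if c1 + 1 = k then some 1 else scanV k vs (c1 + 1) 0)
      else if v = 2 then (if c2 + 1 = k then some 2 else scanV k vs 0 (c2 + 1))
      else scanV k vs 0 0

lemma lineScanA_eq_scanV (cell : Int → Int) (k : Int) (js : List Int) (c1 c2 : Int) :
    lineScanA cell k js c1 c2 = scanV k (js.map cell) c1 c2 := by
  induction js generalizing c1 c2 with
  | nil => rfl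
  | cons j js ih => simp only [lineScanA, List.map_cons, scanV]; split_ifs <;> simp [ih]

lemma winScanGo_short (k : Int) (vs : List Int) (h : (vs.length : Int) < k) :
    winScanGo k vs = none := by
  cases vs with
  | nil => rfl
  | cons v rest =>
      simp only [winScanGo, PySem.List.len_eq]
      rw [if_pos (by exact_mod_cast h)]

lemma scanV_of_k_lt_one (k : Int) (hk : k < 1) (vs : List Int) :
    ∀ c1 c2 : Int, 0 ≤ c1 → 0 ≤ c2 → scanV k vs c1 c2 = none := by
  induction vs with
  | nil => intro c1 c2 _ _; rfl
  | cons v vs ih =>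
      intro c1 c2 h1 h2
      simp only [scanV]
      split_ifs with hv1 hk1 hv2 hk2
      · omega
      · exact ih _ _ (by omega) (by omega)
      · omega
      · exact ih _ _ (by omega) (by omega)
      · exact ih _ _ (by omega) (by omega)

lemma take_all_eq_false (l : List Int) (n : Nat) (i : Nat) (hi : i < n) (hil : i < l.length)
    (p : Int) (h : l[i] ≠ p) : ((l.take n).all (fun x => x == p)) = false := by
  have hlen : i < (l.take n).length := by simp [List.length_take]; omega
  refine List.all_eq_false.mpr ⟨(l.take n)[i], List.getElem_mem hlen, ?_⟩
  have : (l.take n)[i] = l[i] := List.getElem_take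
  simp [this, h]

lemma take_all_eq_false' (l : List Int) (n i : Nat) (hi : i < n) (p x : Int)
    (hx : l[i]? = some x) (hxp : x ≠ p) : ((l.take n).all (fun q => q == p)) = false := by
  obtain ⟨hil, hEq⟩ := List.getElem?_eq_some_iff.mp hx
  exact take_all_eq_false l n i hi hil p (hEq ▸ hxp)

lemma winScanGo_cons_skip (k : Int) (hk : 1 ≤ k) (v : Int) (vs : List Int)
    (hv1 : v ≠ 1) (hv2 : v ≠ 2) : winScanGo k (v :: vs) = winScanGo k vs := by
  simp only [winScanGo, PySem.List.len_eq]
  split_ifs with hlen h1 h2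
  · exact (winScanGo_short k vs (by simp [List.length_cons] at hlen; push_cast at hlen; omega)).symm
  · exfalso
    rw [PySem.List.slice_to _ (by omega)] at h1
    have : ((v :: vs).take k.toNat).all (fun x => x == 1) = false :=
      take_all_eq_false _ _ 0 (by omega) (by simp) 1 (by simpa using hv1)
    simp [this] at h1
  · exfalso
    rw [PySem.List.slice_to _ (by omega)] at h2
    have : ((v :: vs).take k.toNat).all (fun x => x == 2) = false :=
      take_all_eq_false _ _ 0 (by omega) (by simp) 2 (by simpa using hv2)
    simp [this] at h2
  · rfl

lemma winScanGo_shed (p : Int) (k : Int) (hk : 1 ≤ k) (hp : p = 1 ∨ p = 2) :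
    ∀ (m : Nat), (m : Int) < k → ∀ vs : List Int, (∀ x ∈ vs.head?, x ≠ p) →
    winScanGo k (List.replicate m p ++ vs) = winScanGo k vs := by
  intro m
  induction m with
  | zero => intro _ vs _; simp
  | succ m ih =>
      intro hm vs hhead
      have hL : List.replicate (m + 1) p ++ vs = p :: (List.replicate m p ++ vs) := by
        simp [List.replicate_succ]
      rw [hL]
      simp only [winScanGo, PySem.List.len_eq]
      have hp1 : p ≠ 1 ∨ p ≠ 2 := by rcases hp with h | h <;> simp [h]
      split_ifs with hlen h1 h2
      · refine (winScanGo_short k vs ?_).symm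
        simp only [List.length_cons, List.length_append, List.length_replicate] at hlen
        push_cast at hlen ⊢
        omega
      · exfalso
        rw [PySem.List.slice_to _ (by omega)] at h1
        simp only [List.length_cons, List.length_append, List.length_replicate] at hlen
        push_cast at hlen
        cases vs with
        | nil => simp at hlen; omega
        | cons w ws =>
            have hw : w ≠ p := hhead w (by simp)
            have h9 : (p :: (List.replicate m p ++ w :: ws))[m + 1]? = some w := by
              rw [List.getElem?_cons_succ, List.getElem?_append_right (by simp)]
              simp
            rcases hp with hp | hp
            · subst hp
              have := take_all_eq_false' _ k.toNat (m + 1) (by omega) 1 w h9 hw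
              simp [this] at h1
            · subst hp
              have h0 : ((2:Int) :: (List.replicate m 2 ++ w :: ws))[0]? = some 2 := by simp
              have := take_all_eq_false' _ k.toNat 0 (by omega) 1 2 h0 (by norm_num)
              simp [this] at h1
      · exfalso
        rw [PySem.List.slice_to _ (by omega)] at h2
        simp only [List.length_cons, List.length_append, List.length_replicate] at hlen
        push_cast at hlen
        cases vs with
        | nil => simp at hlen; omega
        | cons w ws =>
            have hw : w ≠ p := hhead w (by simp)
            have h9 : (p :: (List.replicate m p ++ w :: ws))[m + 1]? = some w := by
              rw [List.getElem?_cons_succ, List.getElem?_append_right (by simp)]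
              simp
            rcases hp with hp | hp
            · subst hp
              have h0 : ((1:Int) :: (List.replicate m 1 ++ w :: ws))[0]? = some 1 := by simp
              have := take_all_eq_false' _ k.toNat 0 (by omega) 2 1 h0 (by norm_num)
              simp [this] at h2
            · subst hp
              have := take_all_eq_false' _ k.toNat (m + 1) (by omega) 2 w h9 hw
              simp [this] at h2
      · exact ih (by omega) vs hhead

lemma winScanGo_head_win (p : Int) (hp : p = 1 ∨ p = 2) (k : Int) (hk : 1 ≤ k)
    (vs : List Int) : winScanGo k (List.replicate k.toNat p ++ vs) = some p := by
  have hcons : List.replicate k.toNat p ++ vs = p :: (List.replicate (k.toNat - 1) p ++ vs) := by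
    conv_lhs => rw [show k.toNat = (k.toNat - 1) + 1 by omega]
    simp [List.replicate_succ]
  rw [hcons]
  simp only [winScanGo, PySem.List.len_eq]
  rw [if_neg (by simp [List.length_append]; omega)]
  rw [PySem.List.slice_to _ (by omega)]
  have htake : (p :: (List.replicate (k.toNat - 1) p ++ vs)).take k.toNat
      = List.replicate k.toNat p := by
    rw [← hcons, List.take_left' (by simp)]
  rcases hp with hp | hp <;> subst hp <;> simp [htake] <;> omega

lemma scanV_eq_winScanGo (k : Int) (hk : 1 ≤ k) :
    ∀ (vs : List Int) (c1 c2 : Int), 0 ≤ c1 → 0 ≤ c2 → c1 < k → c2 < k → (c1 = 0 ∨ c2 = 0) →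
    scanV k vs c1 c2 =
      winScanGo k (List.replicate c1.toNat 1 ++ (List.replicate c2.toNat 2 ++ vs)) := by
  intro vs
  induction vs with
  | nil =>
      intro c1 c2 h1 h2 hk1 hk2 hz
      refine (winScanGo_short k _ ?_).symm
      rcases hz with h | h <;> subst h <;>
        simp only [List.append_nil, List.length_append, List.length_replicate] <;> omega
  | cons v vs ih =>
      intro c1 c2 h1 h2 hk1 hk2 hz
      by_cases hv1 : v = 1
      · subst hv1
        have hstep : scanV k (1 :: vs) c1 c2
            = if c1 + 1 = k then some 1 else scanV k vs (c1 + 1) 0 := by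
          simp [scanV]
        rw [hstep]
        by_cases hc2 : c2 = 0
        · subst hc2
          have hlist : List.replicate c1.toNat 1 ++ (List.replicate (0:Int).toNat 2 ++ 1 :: vs)
              = List.replicate (c1.toNat + 1) 1 ++ vs := by
            simp [List.replicate_succ']
          rw [hlist]
          by_cases hck : c1 + 1 = k
          · rw [if_pos hck, show c1.toNat + 1 = k.toNat by omega]
            exact (winScanGo_head_win 1 (Or.inl rfl) k hk vs).symm
          · rw [if_neg hck]
            rw [ih (c1 + 1) 0 (by omega) le_rfl (by omega) (by omega) (Or.inr rfl)]
            simp [show (c1 + 1).toNat = c1.toNat + 1 by omega]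
        · have hc1 : c1 = 0 := hz.resolve_right hc2
          subst hc1
          simp only [Int.toNat_zero, List.replicate_zero, List.nil_append]
          rw [winScanGo_shed 2 k hk (Or.inr rfl) c2.toNat (by omega) (1 :: vs)
            (by intro x hx; simp at hx; subst hx; norm_num)]
          by_cases hck : (0:Int) + 1 = k
          · rw [if_pos hck]
            have h1k : (1:Int) :: vs = List.replicate k.toNat 1 ++ vs := by
              rw [show k.toNat = 1 by omega]; simp
            rw [h1k]
            exact (winScanGo_head_win 1 (Or.inl rfl) k hk vs).symm
          · rw [if_neg hck, zero_add]
            rw [ih 1 0 (by omega) le_rfl (by omega) (by omega) (Or.inr rfl)]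
            simp
      · by_cases hv2 : v = 2
        · subst hv2
          have hstep : scanV k (2 :: vs) c1 c2
              = if c2 + 1 = k then some 2 else scanV k vs 0 (c2 + 1) := by
            simp [scanV]
          rw [hstep]
          by_cases hc1 : c1 = 0
          · subst hc1
            simp only [Int.toNat_zero, List.replicate_zero, List.nil_append]
            have hlist : List.replicate c2.toNat 2 ++ 2 :: vs
                = List.replicate (c2.toNat + 1) 2 ++ vs := by
              simp [List.replicate_succ']
            rw [hlist]
            by_cases hck : c2 + 1 = k
            · rw [if_pos hck, show c2.toNat + 1 = k.toNat by omega]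
              exact (winScanGo_head_win 2 (Or.inr rfl) k hk vs).symm
            · rw [if_neg hck]
              rw [ih 0 (c2 + 1) le_rfl (by omega) (by omega) (by omega) (Or.inl rfl)]
              simp [show (c2 + 1).toNat = c2.toNat + 1 by omega]
          · have hc2 : c2 = 0 := hz.resolve_left hc1
            subst hc2
            simp only [Int.toNat_zero, List.replicate_zero, List.nil_append]
            rw [winScanGo_shed 1 k hk (Or.inl rfl) c1.toNat (by omega) (2 :: vs)
              (by intro x hx; simp at hx; subst hx; norm_num)]
            by_cases hck : (0:Int) + 1 = k
            · rw [if_pos hck]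
              have h2k : (2:Int) :: vs = List.replicate k.toNat 2 ++ vs := by
                rw [show k.toNat = 1 by omega]; simp
              rw [h2k]
              exact (winScanGo_head_win 2 (Or.inr rfl) k hk vs).symm
            · rw [if_neg hck, zero_add]
              rw [ih 0 1 le_rfl (by omega) (by omega) (by omega) (Or.inl rfl)]
              simp
        · have hstep : scanV k (v :: vs) c1 c2 = scanV k vs 0 0 := by
            simp [scanV, hv1, hv2]
          rw [hstep]
          rw [ih 0 0 le_rfl le_rfl (by omega) (by omega) (Or.inl rfl)]
          simp only [Int.toNat_zero, List.replicate_zero, List.nil_append]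
          rcases hz with hc1 | hc2
          · subst hc1
            simp only [Int.toNat_zero, List.replicate_zero, List.nil_append]
            rw [winScanGo_shed 2 k hk (Or.inr rfl) c2.toNat (by omega) (v :: vs)
              (by intro x hx; simp at hx; subst hx; exact hv2)]
            exact (winScanGo_cons_skip k hk v vs hv1 hv2).symm
          · subst hc2
            simp only [Int.toNat_zero, List.replicate_zero, List.nil_append]
            rw [winScanGo_shed 1 k hk (Or.inl rfl) c1.toNat (by omega) (v :: vs)
              (by intro x hx; simp at hx; subst hx; exact hv1)]
            exact (winScanGo_cons_skip k hk v vs hv1 hv2).symm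

lemma scanV_eq_winScan (k : Int) (vs : List Int) : scanV k vs 0 0 = winScan vs k := by
  unfold winScan
  split_ifs with h
  · exact scanV_of_k_lt_one k h vs 0 0 le_rfl le_rfl
  · have := scanV_eq_winScanGo k (by omega) vs 0 0 le_rfl le_rfl (by omega) (by omega)
      (Or.inl rfl)
    simpa using this

lemma linesLoopB_append (k : Int) (as bs : List (List Int)) :
    linesLoopB k (as ++ bs) =
      (match linesLoopB k as with | some r => some r | none => linesLoopB k bs) := by
  induction as with
  | nil => simp [linesLoopB]
  | cons a as ih =>
      simp only [List.cons_append, linesLoopB]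
      cases winScan a k <;> simp [ih]

lemma rowsLoopA_eq (plansza : List (List Int)) (nc k : Int) (ws : List Int) :
    rowsLoopA plansza nc k ws = linesLoopB k
      (ws.map (fun w => (PySem.List.pyRange 0 nc 1).map (fun j => cellA plansza w j))) := by
  induction ws with
  | nil => rfl
  | cons w ws ih =>
      simp only [rowsLoopA, List.map_cons, linesLoopB]
      rw [lineScanA_eq_scanV, scanV_eq_winScan]
      cases winScan ((PySem.List.pyRange 0 nc 1).map (fun j => cellA plansza w j)) k <;>
        simp [ih]

lemma colsLoopA_eq (plansza : List (List Int)) (nr k : Int) (cs : List Int) :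
    colsLoopA plansza nr k cs = linesLoopB k
      (cs.map (fun c => (PySem.List.pyRange 0 nr 1).map (fun i => cellA plansza i c))) := by
  induction cs with
  | nil => rfl
  | cons c cs ih =>
      simp only [colsLoopA, List.map_cons, linesLoopB]
      rw [lineScanA_eq_scanV, scanV_eq_winScan]
      cases winScan ((PySem.List.pyRange 0 nr 1).map (fun i => cellA plansza i c)) k <;>
        simp [ih]

lemma remisLineA_eq (cell : Int → Int) (js : List Int) :
    remisLineA cell js = (js.map cell).all (fun v => !(v == 0)) := by
  induction js with
  | nil => rfl
  | cons j js ih =>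
      simp only [remisLineA, List.map_cons, List.all_cons]
      split_ifs with h <;> simp [h, ih]

lemma remisRowsA_eq (plansza : List (List Int)) (nc : Int) (ws : List Int) :
    remisRowsA plansza nc ws = (ws.map (fun w =>
      (PySem.List.pyRange 0 nc 1).map (fun j => cellA plansza w j))).all
        (fun l => l.all (fun v => !(v == 0))) := by
  induction ws with
  | nil => rfl
  | cons w ws ih =>
      simp only [remisRowsA, List.map_cons, List.all_cons]
      rw [remisLineA_eq]
      split_ifs with h <;> simp [h, ih]

lemma rowvals (plansza : List (List Int)) (w : Nat) (hw : w < plansza.length) (n : Nat)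
    (hn : n ≤ (plansza[w]).length) :
    (PySem.List.pyRange 0 (n : Int) 1).map (fun j => cellA plansza (w : Int) j)
      = (plansza[w]).take n := by
  apply List.ext_getElem
  · simp [PySem.List.length_pyRange_one, List.length_take]; omega
  · intro i h1 h2
    have hlen : i < n := by
      simpa [PySem.List.length_pyRange_one] using h1
    have h3 : i < (plansza[w]).length := by omega
    simp only [List.getElem_map]
    rw [PySem.List.getElem_pyRange_one]
    have hz : (0 : Int) + (i : Int) = ((i : Nat) : Int) := by ring
    rw [hz]
    simp [cellA, PySem.List.pyGet?_natCast, List.getElem?_eq_getElem hw,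
      List.getElem?_eq_getElem h3, List.getElem_take]

lemma rowslist (plansza : List (List Int)) (nc : Nat)
    (hpre : ∀ row ∈ plansza, nc ≤ row.length) :
    (PySem.List.pyRange 0 ((plansza.length : Int)) 1).map
      (fun w => (PySem.List.pyRange 0 (nc : Int) 1).map (fun j => cellA plansza w j))
      = plansza.map (fun row => row.take nc) := by
  apply List.ext_getElem
  · simp [PySem.List.length_pyRange_one]
  · intro i h1 h2
    have hi : i < plansza.length := by
      simpa [PySem.List.length_pyRange_one] using h1
    simp only [List.getElem_map]
    rw [PySem.List.getElem_pyRange_one]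
    have hz : (0 : Int) + (i : Int) = ((i : Nat) : Int) := by ring
    rw [hz]
    exact rowvals plansza i hi nc (hpre _ (List.getElem_mem hi))

lemma colvals (plansza : List (List Int)) (nc : Nat)
    (hpre : ∀ row ∈ plansza, nc ≤ row.length) (c : Nat) (hc : c < nc) :
    (PySem.List.pyRange 0 ((plansza.length : Int)) 1).map
        (fun i => cellA plansza i (c : Int))
      = (plansza.map (fun row => row.take nc)).map
          (fun row => PySem.List.pyGetD row (c : Int) 0) := by
  apply List.ext_getElem
  · simp [PySem.List.length_pyRange_one]
  · intro i h1 h2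
    have hi : i < plansza.length := by
      simpa [PySem.List.length_pyRange_one] using h1
    have hrow : nc ≤ (plansza[i]).length := hpre _ (List.getElem_mem hi)
    simp only [List.getElem_map]
    rw [PySem.List.getElem_pyRange_one]
    have hz : (0 : Int) + (i : Int) = ((i : Nat) : Int) := by ring
    rw [hz]
    have hctake : c < ((plansza[i]).take nc).length := by
      simp [List.length_take]; omega
    rw [PySem.List.pyGetD_natCast]
    rw [List.getD_eq_getElem _ _ hctake]
    simp [cellA, PySem.List.pyGet?_natCast, List.getElem?_eq_getElem hi,
      List.getElem?_eq_getElem (show c < (plansza[i]).length by omega), List.getElem_take]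

lemma colslist (plansza : List (List Int)) (nc : Nat)
    (hpre : ∀ row ∈ plansza, nc ≤ row.length) :
    (PySem.List.pyRange 0 (nc : Int) 1).map
        (fun c => (PySem.List.pyRange 0 ((plansza.length : Int)) 1).map
          (fun i => cellA plansza i c))
      = (PySem.List.pyRange 0 (nc : Int) 1).map
          (fun c => (plansza.map (fun row => row.take nc)).map
            (fun row => PySem.List.pyGetD row c 0)) := by
  apply List.map_congr_left
  intro c hc
  rw [PySem.List.mem_pyRange_one] at hc
  obtain ⟨hc0, hcn⟩ := hc
  have hcast : c = ((c.toNat : Nat) : Int) := by omega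
  rw [hcast]
  exact colvals plansza nc hpre c.toNat (by omega)

lemma pvAssemble (o1 o2 : Option Int) (d : Int) :
    (match o1 with | some r => r | none => match o2 with | some r => r | none => d)
    = (match (match o1 with | some r => some r | none => o2) with
        | some r => r | none => d) := by
  cases o1 <;> cases o2 <;> rfl

-- ===== VERDICT (by name: the statement is the Claim_ definition above) =====
theorem czy_wygrana_spec : Claim_equal_czy_wygrana := by
  intro plansza k hdom hpre
  obtain ⟨hne, hlen⟩ := hpre
  unfold Spec_czy_wygrana czy_wygrana czy_wygrana_alt
  simp only [PySem.List.len_eq]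
  have hslice : plansza.map (fun row => PySem.List.slice row none
      (some ((plansza.headD []).length : Int)))
      = plansza.map (fun row => row.take (plansza.headD []).length) := by
    apply List.map_congr_left
    intro row _
    rw [PySem.List.slice_to _ (by positivity)]
    simp
  have hrows := rowslist plansza (plansza.headD []).length hlen
  have hcols := colslist plansza (plansza.headD []).length hlen
  have hremis : czy_remis plansza
      = (plansza.map (fun row => row.take (plansza.headD []).length)).all
          (fun row => row.all (fun v => !(v == 0))) := by
    unfold czy_remis
    simp only [PySem.List.len_eq]
    rw [remisRowsA_eq, hrows]
  rw [rowsLoopA_eq, colsLoopA_eq]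
  simp only [hslice, hrows, hcols, hremis, linesLoopB_append]
  exact pvAssemble _ _ _
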